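-- pv_equiv track=rewrite | github.com/Yuvika687/Unsupervised-Crowd-Density-Segmentation-for-Public-Event-Safety | app.py | _sort_reading_order
-- ===== SOURCE A (Python) =====
-- def _sort_reading_order(peaks):
--     """
--     Sort detected head positions in reading order:
--     left-to-right, top-to-bottom with a row tolerance
--     so dots on the same visual row get the same Y rank.
--     """
--     if not peaks:
--         return peaks
--
--     # Sort by Y (row) first
--     pts = sorted(peaks, key=lambda p: p[0])
--
--     # Group into visual rows using a tolerance
--     row_tolerance = 20  # pixels
--     rows = []
--     current_row = [pts[0]]
--
--     for p in pts[1:]: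
--         if abs(p[0] - current_row[0][0]) <= row_tolerance:
--             current_row.append(p)
--         else:
--             # Sort the completed row left-to-right by X
--             rows.append(sorted(current_row, key=lambda p: p[1]))
--             current_row = [p]
--     rows.append(sorted(current_row, key=lambda p: p[1]))
--
--     return [p for row in rows for p in row]
-- ===== SOURCE B (Python) =====
-- def _sort_reading_order(peaks):
--     """
--     Sort detected head positions in reading order:
--     left-to-right, top-to-bottom with a row tolerance
--     so dots on the same visual row get the same Y rank.
--     """
--     if not peaks:
--         return peaks
--     return _rows(sorted(peaks, key=lambda p: p[0]))
--
--
-- def _rows(pts):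
--     # Recursive row decomposition: peel off the leading visual row
--     # (everything within 20px of the first point's Y), emit it sorted
--     # by X, and recurse on the remainder.
--     if not pts:
--         return []
--     head = pts[0]
--     k = 1
--     while k < len(pts) and abs(pts[k][0] - head[0]) <= 20:
--         k += 1
--     return sorted(pts[:k], key=lambda p: p[1]) + _rows(pts[k:])
-- ===== Notes on version B (the rewrite author's own statement) =====
-- stated objective: simpler
-- what changed: Replaces A's single accumulator loop carrying (rows, current_row) plus a final flatten with a recursive decomposition that peels the leading visual row (a takeWhile on the Y-sorted list), emits it sorted by X, and recurses on the rest; no row-of-rows list is ever built.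
import Mathlib
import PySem

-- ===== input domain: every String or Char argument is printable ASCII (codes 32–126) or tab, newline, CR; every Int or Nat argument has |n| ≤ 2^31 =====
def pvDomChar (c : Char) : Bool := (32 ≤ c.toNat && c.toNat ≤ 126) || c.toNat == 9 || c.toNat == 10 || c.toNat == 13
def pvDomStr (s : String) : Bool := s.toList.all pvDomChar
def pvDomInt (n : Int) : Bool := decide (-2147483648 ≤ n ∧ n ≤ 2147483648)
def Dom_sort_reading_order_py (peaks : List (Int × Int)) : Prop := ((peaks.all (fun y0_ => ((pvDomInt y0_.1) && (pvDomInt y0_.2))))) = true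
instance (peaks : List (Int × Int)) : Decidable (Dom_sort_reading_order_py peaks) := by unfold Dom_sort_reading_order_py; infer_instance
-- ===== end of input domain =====

-- B replaces A's accumulator loop (rows, current_row) + final flatten by a recursion that
-- peels the leading visual row (takeWhile) and recurses on the rest (objective: simpler).

-- ===== PORT A =====
-- literal transliteration of A: sort by Y, fold over pts[1:] carrying (rows, current_row),
-- flatten at the end.  current_row is nonempty throughout the loop (it starts as [pts[0]]
-- and is reset to [p]), so headD's default is never used.
def sort_reading_order_py (peaks : List (Int × Int)) : List (Int × Int) :=
  if peaks = [] then peaks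
  else
    let pts := PySem.List.sorted peaks (fun p => p.1) false
    match pts with
    | [] => []   -- unreachable: sorted of a nonempty list is nonempty
    | p0 :: rest =>
      let st := rest.foldl
        (fun (st : List (List (Int × Int)) × List (Int × Int)) p =>
          if |p.1 - (st.2.headD (0, 0)).1| ≤ 20 then (st.1, st.2 ++ [p])
          else (st.1 ++ [PySem.List.sorted st.2 (fun q => q.2) false], [p]))
        ([], [p0])
      (st.1 ++ [PySem.List.sorted st.2 (fun q => q.2) false]).flatMap id

-- ===== PORT B =====
-- _rows: peel the leading row (while-scan = takeWhile on the tail), sort it by X, recurse.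
def pvRows : List (Int × Int) → List (Int × Int)
  | [] => []
  | h :: t =>
    PySem.List.sorted (h :: t.takeWhile (fun p => |p.1 - h.1| ≤ 20)) (fun q => q.2) false
      ++ pvRows (t.dropWhile (fun p => |p.1 - h.1| ≤ 20))
termination_by pts => pts.length
decreasing_by
  simpa using Nat.lt_succ_of_le (List.length_dropWhile_le _ _)

def sort_reading_order_py_alt (peaks : List (Int × Int)) : List (Int × Int) :=
  if peaks = [] then peaks
  else pvRows (PySem.List.sorted peaks (fun p => p.1) false)

-- ===== PRECONDITION & SPEC =====
def Spec_sort_reading_order_py (peaks : List (Int × Int)) (out : List (Int × Int)) : Prop := out = sort_reading_order_py_alt peaks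
instance (peaks : List (Int × Int)) (out : List (Int × Int)) : Decidable (Spec_sort_reading_order_py peaks out) := by unfold Spec_sort_reading_order_py; infer_instance

-- ===== CLAIM (what is proved, stated in full; the proofs are below) =====
def Claim_equal_sort_reading_order_py : Prop := ∀ (peaks : List (Int × Int)), Dom_sort_reading_order_py peaks → Spec_sort_reading_order_py peaks (sort_reading_order_py peaks)

-- ===== LEMMAS AND PROOFS =====

-- A's loop, flattened: folding over `rest` with current row `a :: cr` produces the flatten of
-- the finished rows, then the current row completed by takeWhile, then B's recursion on the rest.
theorem pv_loop_eq (rest : List (Int × Int)) :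
    ∀ (rows : List (List (Int × Int))) (a : Int × Int) (cr : List (Int × Int)),
      (let st := rest.foldl
        (fun (st : List (List (Int × Int)) × List (Int × Int)) p =>
          if |p.1 - (st.2.headD (0, 0)).1| ≤ 20 then (st.1, st.2 ++ [p])
          else (st.1 ++ [PySem.List.sorted st.2 (fun q => q.2) false], [p]))
        (rows, a :: cr)
       (st.1 ++ [PySem.List.sorted st.2 (fun q => q.2) false]).flatMap id)
      = rows.flatMap id
        ++ PySem.List.sorted (a :: (cr ++ rest.takeWhile (fun p => |p.1 - a.1| ≤ 20)))
             (fun q => q.2) false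
        ++ pvRows (rest.dropWhile (fun p => |p.1 - a.1| ≤ 20)) := by
  induction rest with
  | nil => intro rows a cr; simp [pvRows]
  | cons h t ih =>
    intro rows a cr
    by_cases hP : |h.1 - a.1| ≤ 20
    · simpa [hP, List.takeWhile_cons, List.dropWhile_cons, List.append_assoc] using
        ih rows a (cr ++ [h])
    · have := ih (rows ++ [PySem.List.sorted (a :: cr) (fun q => q.2) false]) h []
      simp only [List.foldl_cons, List.headD, hP, if_false] at this ⊢
      rw [this]
      simp [pvRows, hP, List.append_assoc]

-- ===== VERDICT (by name: the statement is the Claim_ definition above) =====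
theorem sort_reading_order_py_spec : Claim_equal_sort_reading_order_py := by
  intro peaks _
  unfold Spec_sort_reading_order_py sort_reading_order_py sort_reading_order_py_alt
  by_cases hp : peaks = []
  · simp [hp]
  · simp only [hp, if_false]
    have hne : PySem.List.sorted peaks (fun p => p.1) false ≠ [] := by
      simpa [PySem.List.sorted_eq_nil_iff] using hp
    cases hs : PySem.List.sorted peaks (fun p => p.1) false with
    | nil => exact absurd hs hne
    | cons p0 rest =>
      have := pv_loop_eq rest [] p0 []
      simp only [List.flatMap_nil, List.nil_append] at this
      exact this.trans (by rw [pvRows])
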